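-- pv_equiv track=rewrite | github.com/gnusij/advent-of-code-2021 | 17/1.py | can_land_dx
-- ===== SOURCE A (Python) =====
-- minx = 124
--
-- maxx = 174
--
-- def can_land_dx(step):
--     for dx in range(1, maxx):
--         x = 0
--         for _ in range(step):
--             x += dx
--             if dx > 0:
--                 dx -= 1
--         if minx <= x <= maxx:
--             return True
--     return False
-- ===== SOURCE B (Python) =====
-- minx = 124
--
-- maxx = 174
--
-- def can_land_dx(step):
--     # Closed-form x-position after `step` drag steps, per dx, instead of the inner loop.
--     if step <= 0:
--         return False
--     return any(
--         minx <= (dx * (dx + 1) // 2 if step >= dx else step * dx - step * (step - 1) // 2) <= maxx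
--         for dx in range(1, maxx)
--     )
-- ===== Notes on version B (the rewrite author's own statement) =====
-- stated objective: faster
-- what changed: The inner per-step simulation loop is replaced by the closed-form arithmetic-series sum of the drag-decayed velocity, so each dx is checked in O(1).
import Mathlib
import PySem

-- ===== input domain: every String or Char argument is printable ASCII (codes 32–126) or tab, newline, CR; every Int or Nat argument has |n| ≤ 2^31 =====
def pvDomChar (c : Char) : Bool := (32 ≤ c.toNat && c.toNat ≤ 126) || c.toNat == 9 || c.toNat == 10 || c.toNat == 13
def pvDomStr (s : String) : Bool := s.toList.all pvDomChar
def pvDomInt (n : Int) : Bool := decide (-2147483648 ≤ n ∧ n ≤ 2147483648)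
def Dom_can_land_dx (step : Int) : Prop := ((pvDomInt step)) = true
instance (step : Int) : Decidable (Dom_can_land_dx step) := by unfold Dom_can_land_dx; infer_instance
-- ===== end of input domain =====

-- B replaces A's inner per-step simulation by the closed-form arithmetic-series sum per dx (faster in a timing run).

-- ===== PORT A =====
-- one step of the inner loop body: x += dx; if dx > 0: dx -= 1
def pvStepA (p : Int × Int) : Int × Int :=
  (p.1 + p.2, if p.2 > 0 then p.2 - 1 else p.2)

-- the outer 'for dx in range(1, maxx)' with early return
def pvLoopA : List Int → Int → Bool
  | [], _ => false
  | dx :: rest, step =>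
    let x := ((PySem.List.pyRange 0 step 1).foldl (fun p _ => pvStepA p) (0, dx)).1
    if 124 ≤ x ∧ x ≤ 174 then true else pvLoopA rest step

def can_land_dx (step : Int) : Bool :=
  pvLoopA (PySem.List.pyRange 1 174 1) step

-- ===== PORT B =====
def can_land_dx_alt (step : Int) : Bool :=
  if step ≤ 0 then false
  else
    (PySem.List.pyRange 1 174 1).any (fun dx =>
      let x : Int :=
        if step ≥ dx then PySem.Int.floordiv (dx * (dx + 1)) 2
        else step * dx - PySem.Int.floordiv (step * (step - 1)) 2
      decide (124 ≤ x ∧ x ≤ 174))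

-- ===== PRECONDITION & SPEC =====
def Spec_can_land_dx (step : Int) (out : Bool) : Prop := out = can_land_dx_alt step
instance (step : Int) (out : Bool) : Decidable (Spec_can_land_dx step out) := by unfold Spec_can_land_dx; infer_instance

-- ===== CLAIM (what is proved, stated in full; the proofs are below) =====
def Claim_equal_can_land_dx : Prop := ∀ (step : Int), Dom_can_land_dx step → Spec_can_land_dx step (can_land_dx step)

-- ===== LEMMAS AND PROOFS =====

-- the element-ignoring fold is an iterate of pvStepA
theorem foldl_stepA_eq_iterate (l : List Int) (p : Int × Int) :
    l.foldl (fun q _ => pvStepA q) p = pvStepA^[l.length] p := by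
  induction l generalizing p with
  | nil => rfl
  | cons a t ih =>
    simp [List.foldl, ih, Function.iterate_succ_apply]

-- closed form for the iterate's first component, for nonnegative dx
theorem iterate_stepA_fst (n : Nat) : ∀ (x dx : Int), 0 ≤ dx →
    (pvStepA^[n] (x, dx)).1 =
      x + (if (n : Int) ≥ dx then dx * (dx + 1) / 2
           else (n : Int) * dx - (n : Int) * ((n : Int) - 1) / 2) := by
  induction n with
  | zero =>
    intro x dx hdx
    simp only [Function.iterate_zero, id_eq, Nat.cast_zero]
    by_cases h : (0 : Int) ≥ dx
    · have hdx0 : dx = 0 := le_antisymm h hdx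
      simp [hdx0]
    · rw [if_neg h]
      norm_num
  | succ n ih =>
    intro x dx hdx
    rw [Function.iterate_succ_apply]
    by_cases hpos : dx > 0
    · have hstep : pvStepA (x, dx) = (x + dx, dx - 1) := by simp [pvStepA, hpos]
      rw [hstep, ih (x + dx) (dx - 1) (by omega)]
      by_cases hc : ((n : Int)) ≥ dx - 1
      · have hc' : ((n : Int) + 1) ≥ dx := by omega
        rw [if_pos hc]
        rw [show ((n : Nat) + 1 : Nat) = n + 1 from rfl]
        push_cast
        rw [if_pos hc']
        have hsplit : dx * (dx + 1) = (dx - 1) * dx + dx * 2 := by ring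
        rw [hsplit, Int.add_mul_ediv_right _ _ (by norm_num : (2:Int) ≠ 0)]
        ring
      · have hc' : ¬ ((n : Int) + 1 ≥ dx) := by omega
        rw [if_neg hc]
        push_cast
        rw [if_neg hc']
        have hsplit : ((n : Int) + 1) * ((n : Int) + 1 - 1) = (n : Int) * ((n : Int) - 1) + (n : Int) * 2 := by ring
        rw [hsplit, Int.add_mul_ediv_right _ _ (by norm_num : (2:Int) ≠ 0)]
        ring
    · have hdx0 : dx = 0 := by omega
      subst hdx0
      have hstep : pvStepA (x, 0) = (x + 0, 0) := by simp [pvStepA]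
      rw [hstep, ih (x + 0) 0 le_rfl]
      push_cast
      rw [if_pos (by omega : ((n : Int)) ≥ 0), if_pos (by omega : ((n : Int)) + 1 ≥ 0)]
      norm_num

-- for step ≤ 0 the inner range is empty, so A never hits the target
theorem loopA_nonpos (step : Int) (hs : step ≤ 0) : ∀ l, pvLoopA l step = false := by
  intro l
  induction l with
  | nil => rfl
  | cons d t ih =>
    have hr : PySem.List.pyRange 0 step 1 = [] := PySem.List.pyRange_one_eq_nil hs
    simp only [pvLoopA, hr, List.foldl]
    rw [if_neg (by norm_num)]
    exact ih

-- A's per-dx value equals B's closed form, so the early-return scan is the `any`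
theorem loopA_eq_any (step : Int) (hs : 0 < step) : ∀ (l : List Int), (∀ d ∈ l, 0 ≤ d) →
    pvLoopA l step = l.any (fun dx =>
      let x : Int :=
        if step ≥ dx then PySem.Int.floordiv (dx * (dx + 1)) 2
        else step * dx - PySem.Int.floordiv (step * (step - 1)) 2
      decide (124 ≤ x ∧ x ≤ 174)) := by
  intro l hl
  induction l with
  | nil => rfl
  | cons d t ih =>
    have hd : 0 ≤ d := hl d (List.mem_cons_self)
    have ht : ∀ x ∈ t, 0 ≤ x := fun x hx => hl x (List.mem_cons_of_mem _ hx)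
    have hlen : (PySem.List.pyRange 0 step 1).length = step.toNat := by
      rw [PySem.List.length_pyRange_one]; omega
    have hcast : ((step.toNat : Nat) : Int) = step := by omega
    have hx : ((PySem.List.pyRange 0 step 1).foldl (fun p _ => pvStepA p) (0, d)).1 =
        (if step ≥ d then PySem.Int.floordiv (d * (d + 1)) 2
         else step * d - PySem.Int.floordiv (step * (step - 1)) 2) := by
      rw [foldl_stepA_eq_iterate, hlen, iterate_stepA_fst step.toNat 0 d hd, hcast]
      have h1 : PySem.Int.floordiv (d * (d + 1)) 2 = d * (d + 1) / 2 :=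
        PySem.Int.floordiv_eq_ediv_of_pos (by norm_num)
      have h2 : PySem.Int.floordiv (step * (step - 1)) 2 = step * (step - 1) / 2 :=
        PySem.Int.floordiv_eq_ediv_of_pos (by norm_num)
      rw [h1, h2, zero_add]
    simp only [pvLoopA, List.any_cons, hx]
    by_cases hc : 124 ≤ (if step ≥ d then PySem.Int.floordiv (d * (d + 1)) 2
         else step * d - PySem.Int.floordiv (step * (step - 1)) 2) ∧
        (if step ≥ d then PySem.Int.floordiv (d * (d + 1)) 2
         else step * d - PySem.Int.floordiv (step * (step - 1)) 2) ≤ 174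
    · simp [ih ht]
    · simp [ih ht]

-- ===== VERDICT (by name: the statement is the Claim_ definition above) =====
theorem can_land_dx_spec : Claim_equal_can_land_dx := by
  unfold Claim_equal_can_land_dx
  intro step _
  unfold Spec_can_land_dx can_land_dx can_land_dx_alt
  by_cases hs : step ≤ 0
  · rw [if_pos hs]
    exact loopA_nonpos step hs _
  · rw [if_neg hs]
    exact loopA_eq_any step (lt_of_not_ge hs) _ (fun d hd => by
      have := (PySem.List.mem_pyRange_one).mp hd
      omega)
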